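-- pv_equiv track=rewrite | github.com/PTPhuongAnh/MyProject | PY01059.py | tich
-- ===== SOURCE A (Python) =====
-- def tich(s):
--     tich=1
--     tong=0
--     for i in range(1,len(s),2):
--         tong+=int(s[i])
--     if(tong==0): return 0
--     else:
--         for i in range(1,len(s),2):
--             if(int(s[i])!=0):
--                 tich*=int(s[i])
--     return tich
-- ===== SOURCE B (Python) =====
-- def tich(s):
--     # Pairwise iterator traversal: consume characters two at a time, keep a
--     # running product and a "seen a nonzero odd-index digit" flag.
--     p = 1
--     seen = False
--     it = iter(s)
--     for _even in it:
--         odd = next(it, None)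
--         if odd is None:
--             break
--         d = int(odd)
--         if d != 0:
--             p *= d
--             seen = True
--     return p if seen else 0
-- ===== Notes on version B (the rewrite author's own statement) =====
-- stated objective: alternative
-- what changed: Replaces A's two index-loops (sum pass, then rescan-and-multiply) by a single pairwise traversal of the characters themselves with an iterator, keeping a running product and a seen-nonzero flag instead of computing a digit sum.
import Mathlib
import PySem

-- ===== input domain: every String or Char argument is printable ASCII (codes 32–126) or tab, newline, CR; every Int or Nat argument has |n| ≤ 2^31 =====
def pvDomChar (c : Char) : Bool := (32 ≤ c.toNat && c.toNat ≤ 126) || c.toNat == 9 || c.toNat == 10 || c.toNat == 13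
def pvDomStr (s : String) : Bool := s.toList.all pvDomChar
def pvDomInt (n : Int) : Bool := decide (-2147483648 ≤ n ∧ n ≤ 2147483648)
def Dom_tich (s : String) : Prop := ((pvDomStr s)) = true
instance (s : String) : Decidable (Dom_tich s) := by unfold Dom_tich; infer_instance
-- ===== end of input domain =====

-- B replaces A's two index-loops (sum, then rescan-and-multiply) by one pairwise
-- traversal of the characters with a running product and a seen-nonzero flag.

-- int(c) for a single character c; Pre_tich guarantees the char is a digit, so the
-- ValueError case is excluded and the 0 default is never taken.
def charInt (c : Char) : Int := if c.isDigit then ((c.toNat : Int) - 48) else 0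

-- int(s[i]) via Python indexing (used by the port of A, which indexes by i)
def digitAt (s : String) (i : Int) : Int :=
  match PySem.Str.pyGet? s i with
  | some c => charInt c
  | none => 0

-- ===== PORT A =====
def tich (s : String) : Int :=
  let tong := (PySem.List.pyRange 1 (PySem.Str.len s) 2).foldl (fun t i => t + digitAt s i) 0
  if tong = 0 then 0
  else (PySem.List.pyRange 1 (PySem.Str.len s) 2).foldl
        (fun p i => if digitAt s i ≠ 0 then p * digitAt s i else p) 1

-- ===== PORT B =====
-- the pairwise loop: consume two characters at a time, int() the second one
def tichGo : List Char → Int → Bool → Int × Bool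
  | _ :: b :: rest, p, seen =>
      let d := charInt b
      if d ≠ 0 then tichGo rest (p * d) true else tichGo rest p seen
  | _, p, seen => (p, seen)

def tich_alt (s : String) : Int :=
  let r := tichGo s.toList 1 false
  if r.2 then r.1 else 0

-- ===== PRECONDITION & SPEC =====
-- Pre_tich: every odd-index character of s is a decimal digit; on any other
-- character int(s[i]) raises ValueError in A (and in B).
def Pre_tich (s : String) : Prop :=
  ∀ i : Nat, i < s.toList.length → i % 2 = 1 → (s.toList.getD i ' ').isDigit = true
instance (s : String) : Decidable (Pre_tich s) := by unfold Pre_tich; infer_instance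

def pvWitness_tich : String := "1234"

def Spec_tich (s : String) (out : Int) : Prop := out = tich_alt s
instance (s : String) (out : Int) : Decidable (Spec_tich s out) := by unfold Spec_tich; infer_instance

-- ===== CLAIM (what is proved, stated in full; the proofs are below) =====
def Claim_equal_tich : Prop := ∀ (s : String), Dom_tich s → Pre_tich s → Spec_tich s (tich s)

-- ===== LEMMAS AND PROOFS =====

-- the odd-index characters' int() values, by the same two-at-a-time pairing B uses
def oddDigits : List Char → List Int
  | _ :: b :: rest => charInt b :: oddDigits rest
  | _ => []

theorem charInt_nonneg (c : Char) : 0 ≤ charInt c := by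
  unfold charInt
  by_cases hd : c.isDigit
  · have : 48 ≤ c.toNat := by
      simp [Char.isDigit] at hd
      exact hd.1
    simp only [hd, if_true]
    omega
  · simp [hd]

-- B's loop computes the product of the nonzero entries of oddDigits and whether any exists
theorem tichGo_eq (l : List Char) (p : Int) (seen : Bool) :
    tichGo l p seen =
      (((oddDigits l).filter (fun d => d ≠ 0)).foldl (· * ·) p,
       seen || !((oddDigits l).filter (fun d => d ≠ 0)).isEmpty) := by
  match l with
  | [] => simp [tichGo, oddDigits]
  | [a] => simp [tichGo, oddDigits]
  | a :: b :: rest =>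
    have ih := tichGo_eq rest
    by_cases h : charInt b = 0
    · simp [tichGo, oddDigits, h, ih]
    · simp [tichGo, oddDigits, h, ih]

theorem foldl_add_shift (l : List Int) (a : Int) :
    l.foldl (· + ·) a = a + l.foldl (· + ·) 0 := by
  induction l generalizing a with
  | nil => simp
  | cons x t ih =>
    rw [List.foldl_cons, List.foldl_cons, ih, ih (0 + x)]
    ring

theorem foldl_add_nonneg (l : List Int) (h : ∀ d ∈ l, 0 ≤ d) :
    0 ≤ l.foldl (· + ·) 0 := by
  induction l with
  | nil => simp
  | cons x t ih =>
    have hx := h x (by simp)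
    have ht := ih (fun d hd => h d (by simp [hd]))
    rw [List.foldl_cons, foldl_add_shift]
    omega

theorem foldl_add_zero_iff (l : List Int) (h : ∀ d ∈ l, 0 ≤ d) :
    l.foldl (· + ·) 0 = 0 ↔ ∀ d ∈ l, d = 0 := by
  induction l with
  | nil => simp
  | cons x t ih =>
    have hx : 0 ≤ x := h x (by simp)
    have ht : ∀ d ∈ t, 0 ≤ d := fun d hd => h d (by simp [hd])
    have hnn := foldl_add_nonneg t ht
    rw [List.foldl_cons, foldl_add_shift]
    constructor
    · intro hz
      have hx0 : x = 0 := by omega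
      have ht0 : t.foldl (· + ·) 0 = 0 := by omega
      intro d hd
      rcases List.mem_cons.mp hd with h1 | h2
      · omega
      · exact (ih ht).mp ht0 d h2
    · intro hall
      have hx0 := hall x (by simp)
      have := (ih ht).mpr (fun d hd => hall d (by simp [hd]))
      omega

theorem foldl_if_eq_filter (l : List Int) (a : Int) :
    l.foldl (fun p d => if d ≠ 0 then p * d else p) a
      = (l.filter (fun d => d ≠ 0)).foldl (· * ·) a := by
  induction l generalizing a with
  | nil => simp
  | cons x t ih =>
    by_cases hx : x ≠ 0
    · rw [List.foldl_cons, if_pos hx, List.filter_cons, if_pos (by simpa using hx),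
        List.foldl_cons, ih]
    · rw [List.foldl_cons, if_neg hx, List.filter_cons, if_neg (by simpa using hx), ih]

-- the odd-index digit values, by two-at-a-time recursion on the character list
theorem oddDigits_nonneg (l : List Char) : ∀ d ∈ oddDigits l, 0 ≤ d := by
  match l with
  | [] => simp [oddDigits]
  | [a] => simp [oddDigits]
  | a :: b :: rest =>
    intro d hd
    rcases List.mem_cons.mp (by simpa [oddDigits] using hd) with h | h
    · exact h ▸ charInt_nonneg b
    · exact oddDigits_nonneg rest d h

theorem range_half_map (l : List Char) :
    (List.range (l.length / 2)).map (fun k => charInt (l.getD (2 * k + 1) ' ')) = oddDigits l := by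
  match l with
  | [] => simp [oddDigits]
  | [a] => simp [oddDigits]
  | a :: b :: rest =>
    have hlen : (a :: b :: rest).length / 2 = rest.length / 2 + 1 := by
      simp [List.length_cons]
      omega
    have hrec := range_half_map rest
    calc (List.range ((a :: b :: rest).length / 2)).map
            (fun k => charInt ((a :: b :: rest).getD (2 * k + 1) ' '))
        = (List.range (rest.length / 2 + 1)).map
            (fun k => charInt ((a :: b :: rest).getD (2 * k + 1) ' ')) := by rw [hlen]
      _ = charInt b ::
            (List.range (rest.length / 2)).map (fun k => charInt (rest.getD (2 * k + 1) ' ')) := by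
            rw [List.range_succ_eq_map, List.map_cons, List.map_map]
            refine congrArg₂ _ (by simp) (List.map_congr_left ?_)
            intro k _
            show charInt ((a :: b :: rest).getD (2 * (k + 1) + 1) ' ')
               = charInt (rest.getD (2 * k + 1) ' ')
            have h2 : 2 * (k + 1) + 1 = (2 * k + 1) + 2 := by ring
            rw [h2]
            rfl
      _ = oddDigits (a :: b :: rest) := by rw [hrec]; simp [oddDigits]

-- the index list of A's loops denotes exactly the oddDigits of the character list
theorem map_digitAt_pyRange (s : String) :
    (PySem.List.pyRange 1 (PySem.Str.len s) 2).map (digitAt s) = oddDigits s.toList := by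
  have hcnt : (if (1 : Int) < PySem.Str.len s
      then (((PySem.Str.len s) - 1 + 2 - 1) / 2).toNat else 0) = s.toList.length / 2 := by
    simp only [PySem.Str.len_eq]
    split_ifs with h <;> omega
  rw [PySem.List.pyRange_of_pos 1 (PySem.Str.len s) (by norm_num), hcnt, List.map_map]
  rw [← range_half_map s.toList]
  apply List.map_congr_left
  intro k hk
  have hk2 : 2 * k + 1 < s.toList.length := by
    simp only [List.mem_range] at hk
    omega
  simp only [Function.comp_apply]
  unfold digitAt
  have hcast : (1 : Int) + 2 * (k : Int) = ((2 * k + 1 : Nat) : Int) := by push_cast; ring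
  rw [hcast, PySem.Str.pyGet?_natCast]
  rw [List.getElem?_eq_getElem hk2]
  simp [List.getD, List.getElem?_eq_getElem hk2]


-- ===== VERDICT (by name: the statement is the Claim_ definition above) =====
theorem tich_spec : Claim_equal_tich := by
  intro s _ _
  unfold Spec_tich tich tich_alt
  rw [tichGo_eq]
  have hA : ∀ (a : Int),
      (PySem.List.pyRange 1 (PySem.Str.len s) 2).foldl (fun t i => t + digitAt s i) a
        = ((PySem.List.pyRange 1 (PySem.Str.len s) 2).map (digitAt s)).foldl (· + ·) a := by
    intro a; rw [List.foldl_map]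
  have hP : ∀ (a : Int),
      (PySem.List.pyRange 1 (PySem.Str.len s) 2).foldl
          (fun p i => if digitAt s i ≠ 0 then p * digitAt s i else p) a
        = ((PySem.List.pyRange 1 (PySem.Str.len s) 2).map (digitAt s)).foldl
            (fun p d => if d ≠ 0 then p * d else p) a := by
    intro a; rw [List.foldl_map]
  simp only [hA, hP, map_digitAt_pyRange]
  have hnn := oddDigits_nonneg s.toList
  rw [foldl_if_eq_filter]
  by_cases hz : (oddDigits s.toList).foldl (· + ·) 0 = 0
  · have hall := (foldl_add_zero_iff _ hnn).mp hz
    have hfe : (oddDigits s.toList).filter (fun d => d ≠ 0) = [] :=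
      List.filter_eq_nil_iff.mpr (fun d hd => by simp [hall d hd])
    rw [if_pos hz, hfe]
    simp
  · have hne : (oddDigits s.toList).filter (fun d => d ≠ 0) ≠ [] := by
      intro hfe
      refine hz ((foldl_add_zero_iff _ hnn).mpr (fun d hd => ?_))
      by_contra h0
      have hmem : d ∈ (oddDigits s.toList).filter (fun d => d ≠ 0) :=
        List.mem_filter.mpr ⟨hd, by simpa using h0⟩
      rw [hfe] at hmem
      simp at hmem
    have hie : ((oddDigits s.toList).filter (fun d => d ≠ 0)).isEmpty = false := by
      simpa [List.isEmpty_iff] using hne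
    rw [if_neg hz, hie]
    simp
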